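-- pv_equiv track=rewrite | github.com/EdisonChendi/leetcodeshuashuashua | topics/dynamic_programming/sfxly/7.4_2.py | longest_matching_brackets
-- ===== SOURCE A (Python) =====
-- from typing import List
--
-- def longest_matching_brackets(brackets: List[str]) -> int:
--     """
--     注意这里的dp方向，按矩形的斜线来DP的
--     """
--     b = brackets
--     o2c = {"(": ")", "[": "]"}
--
--     def match(o, c):
--         return o in o2c and o2c[o] == c
--
--     N = len(brackets)
--     dp = [[0, ]*N for _ in range(N)]
--     for l in range(1, N):
--         for i in range(N-l):
--             j = i+l
--             if match(b[i], b[j]):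
--                 dp[i][j] = max(dp[i][j], 2+dp[i+1][j-1])
--             for k in range(i, j):
--                 dp[i][j] = max(dp[i][k]+dp[k+1][j], dp[i][j])
--     return dp[0][-1]
-- ===== SOURCE B (Python) =====
-- from typing import List
--
-- def longest_matching_brackets(brackets: List[str]) -> int:
--     b = brackets
--
--     def match(o, c):
--         return (o == "(" and c == ")") or (o == "[" and c == "]")
--
--     memo = {}
--
--     def solve(i, j):
--         if j <= i:
--             return 0
--         if (i, j) in memo:
--             return memo[(i, j)]
--         best = 2 + solve(i + 1, j - 1) if match(b[i], b[j]) else 0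
--         for k in range(i, j):
--             s = solve(i, k) + solve(k + 1, j)
--             if s > best:
--                 best = s
--         memo[(i, j)] = best
--         return best
--
--     return solve(0, len(b) - 1)
-- ===== Notes on version B (the rewrite author's own statement) =====
-- stated objective: alternative
-- what changed: Replaced the bottom-up diagonal-by-diagonal table fill with a top-down memoized recursion solve(i, j) over intervals, caching results in a dict keyed by (i, j); Pre_ excludes the empty list, on which A raises IndexError (dp[0][-1] on an empty table).
import Mathlib
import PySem

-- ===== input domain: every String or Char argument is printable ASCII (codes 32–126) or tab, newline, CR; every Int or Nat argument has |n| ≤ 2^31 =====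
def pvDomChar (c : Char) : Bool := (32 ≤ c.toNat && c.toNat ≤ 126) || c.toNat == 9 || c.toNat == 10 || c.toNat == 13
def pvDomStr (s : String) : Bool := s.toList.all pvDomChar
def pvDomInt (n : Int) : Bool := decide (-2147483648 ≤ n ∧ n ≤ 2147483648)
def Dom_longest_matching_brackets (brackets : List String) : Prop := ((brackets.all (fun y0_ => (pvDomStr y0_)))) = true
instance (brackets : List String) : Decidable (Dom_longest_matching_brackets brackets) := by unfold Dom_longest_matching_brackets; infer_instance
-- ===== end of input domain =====

-- B replaces A's bottom-up diagonal table fill by a top-down memoized recursion over intervals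
-- (dict keyed by (i, j)); objective: alternative decomposition, same O(n^3) cost.

-- ===== PORT A =====
-- o2c = {"(": ")", "[": "]"}
def lmbO2c : PySem.Dict String String := PySem.Dict.ofList [("(", ")"), ("[", "]")]

-- `o in o2c and o2c[o] == c`
def lmbPyMatch (o c : String) : Bool :=
  match lmbO2c.get? o with
  | some v => v == c
  | none => false

-- dp[i][j] (indices are provably in range wherever A reads/writes inside the loops)
def lmbGet2 (dp : List (List Int)) (i j : Int) : Int :=
  PySem.List.pyGetD (PySem.List.pyGetD dp i []) j 0

-- dp[i][j] = v
def lmbSet2 (dp : List (List Int)) (i j : Int) (v : Int) : List (List Int) :=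
  PySem.List.pySetD dp i (PySem.List.pySetD (PySem.List.pyGetD dp i []) j v)

def longest_matching_brackets (brackets : List String) : Int :=
  let b := brackets
  let N : Int := brackets.length
  let dp : List (List Int) := (PySem.List.pyRange 0 N 1).map (fun _ => List.replicate brackets.length (0 : Int))
  let dp := (PySem.List.pyRange 1 N 1).foldl (fun dp l =>
    (PySem.List.pyRange 0 (N - l) 1).foldl (fun dp i =>
      let j := i + l
      let dp := if lmbPyMatch (PySem.List.pyGetD b i "") (PySem.List.pyGetD b j "") then
          lmbSet2 dp i j (max (lmbGet2 dp i j) (2 + lmbGet2 dp (i+1) (j-1)))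
        else dp
      (PySem.List.pyRange i j 1).foldl (fun dp k =>
        lmbSet2 dp i j (max (lmbGet2 dp i k + lmbGet2 dp (k+1) j) (lmbGet2 dp i j))) dp) dp) dp
  -- dp[0][-1]  (IndexError on empty input: excluded by Pre_)
  PySem.List.pyGetD (PySem.List.pyGetD dp 0 []) (-1) 0

-- ===== PORT B =====
def bMatch (o c : String) : Bool := (o == "(" && c == ")") || (o == "[" && c == "]")

-- solve(i, j) returning (value, memo); the fuel argument only makes the recursion
-- structurally total (any fuel > j - i is enough and is never exhausted)
def lmbSolve (fuel : Nat) (b : List String) (i j : Int) (memo : PySem.Dict (Int × Int) Int) : Int × PySem.Dict (Int × Int) Int :=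
  match fuel with
  | 0 => (0, memo)
  | fuel + 1 =>
    if j ≤ i then (0, memo) else
    match memo.get? (i, j) with
    | some v => (v, memo)
    | none =>
      let p : Int × PySem.Dict (Int × Int) Int :=
        if bMatch (PySem.List.pyGetD b i "") (PySem.List.pyGetD b j "") then
          let q := lmbSolve fuel b (i+1) (j-1) memo
          (2 + q.1, q.2)
        else (0, memo)
      -- the `for k in range(i, j)` loop, threading (best, memo)
      let r := (PySem.List.pyRange i j 1).foldl (fun st k =>
        let x := lmbSolve fuel b i k st.2
        let y := lmbSolve fuel b (k+1) j x.2
        let s := x.1 + y.1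
        (if st.1 < s then s else st.1, y.2)) p
      (r.1, r.2.insert (i, j) r.1)

def longest_matching_brackets_alt (brackets : List String) : Int :=
  (lmbSolve (brackets.length + 1) brackets 0 ((brackets.length : Int) - 1) PySem.Dict.empty).1

-- ===== PRECONDITION & SPEC =====
-- A raises IndexError (dp[0][-1] on an empty table) iff brackets is empty; Pre_ excludes exactly that input.
def Pre_longest_matching_brackets (brackets : List String) : Prop := brackets ≠ []
instance (brackets : List String) : Decidable (Pre_longest_matching_brackets brackets) := by
  unfold Pre_longest_matching_brackets; infer_instance

def pvWitness_longest_matching_brackets : List String := ["(", "[", "]", ")"]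

def Spec_longest_matching_brackets (brackets : List String) (out : Int) : Prop := out = longest_matching_brackets_alt brackets
instance (brackets : List String) (out : Int) : Decidable (Spec_longest_matching_brackets brackets out) := by unfold Spec_longest_matching_brackets; infer_instance

-- ===== CLAIM (what is proved, stated in full; the proofs are below) =====
def Claim_equal_longest_matching_brackets : Prop := ∀ (brackets : List String), Dom_longest_matching_brackets brackets → Pre_longest_matching_brackets brackets → Spec_longest_matching_brackets brackets (longest_matching_brackets brackets)


-- ===== LEMMAS AND PROOFS =====

-- Pure (memo-free) mirror of B's recursion: the common specification both ports are proved equal to.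
mutual
def gS (b : List String) (i j : Int) : Int :=
  if j ≤ i then 0 else
    gL b i i j (if bMatch (PySem.List.pyGetD b i "") (PySem.List.pyGetD b j "") then 2 + gS b (i+1) (j-1) else 0)
termination_by ((j - i).toNat, (j - i).toNat + 1)
def gL (b : List String) (i k j best : Int) : Int :=
  if i ≤ k ∧ k < j then
    gL b i (k+1) j (if best < gS b i k + gS b (k+1) j then gS b i k + gS b (k+1) j else best)
  else best
termination_by ((j - i).toNat, (j - k).toNat)
end

theorem lmbPyMatch_eq_bMatch (o c : String) : lmbPyMatch o c = bMatch o c := by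
  have hd : lmbO2c = PySem.Dict.mk [("(", ")"), ("[", "]")] := by decide
  unfold lmbPyMatch bMatch
  rw [hd]
  by_cases h1 : o = "("
  · subst h1; simp [PySem.Dict.get?_mk_cons, eq_comm]
  · by_cases h2 : o = "["
    · subst h2; simp [PySem.Dict.get?_mk_cons, eq_comm]
    · have e1 : ("(" == o) = false := beq_false_of_ne (fun h => h1 h.symm)
      have e2 : ("[" == o) = false := beq_false_of_ne (fun h => h2 h.symm)
      have f1 : (o == "(") = false := beq_false_of_ne h1
      have f2 : (o == "[") = false := beq_false_of_ne h2
      simp [e1, e2, f1, f2, PySem.Dict.get?]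

-- memo invariant: every cached value is the corresponding gS value
def lmbInv (b : List String) (m : PySem.Dict (Int × Int) Int) : Prop :=
  ∀ p v, m.get? p = some v → v = gS b p.1 p.2

theorem lmbInv_insert (b : List String) (m : PySem.Dict (Int × Int) Int) (i j v : Int)
    (h : lmbInv b m) (hv : v = gS b i j) : lmbInv b (m.insert (i, j) v) := by
  intro p w hw
  rw [PySem.Dict.get?_insert] at hw
  split at hw
  · rename_i hp; cases hw; subst hp; simpa using hv
  · exact h p w hw

theorem lmbLoopFold_spec (b : List String) (f : Nat) (i j : Int)
    (IH : ∀ (i' j' : Int) (memo : PySem.Dict (Int × Int) Int), (j' - i').toNat < f → lmbInv b memo →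
      (lmbSolve f b i' j' memo).1 = gS b i' j' ∧ lmbInv b (lmbSolve f b i' j' memo).2)
    (hfi : (j - i).toNat ≤ f) :
    ∀ (k : Int) (st : Int × PySem.Dict (Int × Int) Int), i ≤ k → lmbInv b st.2 →
      (((PySem.List.pyRange k j 1).foldl (fun st k =>
        let x := lmbSolve f b i k st.2
        let y := lmbSolve f b (k+1) j x.2
        let s := x.1 + y.1
        (if st.1 < s then s else st.1, y.2)) st).1 = gL b i k j st.1 ∧
      lmbInv b (((PySem.List.pyRange k j 1).foldl (fun st k =>
        let x := lmbSolve f b i k st.2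
        let y := lmbSolve f b (k+1) j x.2
        let s := x.1 + y.1
        (if st.1 < s then s else st.1, y.2)) st).2)) := by
  intro k
  induction hn : (j - k).toNat generalizing k with
  | zero =>
    intro st hik hinv
    have hjk : j ≤ k := by omega
    rw [PySem.List.pyRange_one_eq_nil hjk]
    rw [gL, if_neg (by omega)]
    exact ⟨rfl, hinv⟩
  | succ n ihn =>
    intro st hik hinv
    have hkj : k < j := by omega
    rw [PySem.List.pyRange_one_cons hkj, List.foldl_cons]
    obtain ⟨hx1, hx2⟩ := IH i k st.2 (by omega) hinv
    obtain ⟨hy1, hy2⟩ := IH (k+1) j (lmbSolve f b i k st.2).2 (by omega) hx2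
    have hred : (let x := lmbSolve f b i k st.2
        let y := lmbSolve f b (k+1) j x.2
        let s := x.1 + y.1
        ((if st.1 < s then s else st.1, y.2) : Int × PySem.Dict (Int × Int) Int)) =
        (if st.1 < (lmbSolve f b i k st.2).1 + (lmbSolve f b (k+1) j (lmbSolve f b i k st.2).2).1
           then (lmbSolve f b i k st.2).1 + (lmbSolve f b (k+1) j (lmbSolve f b i k st.2).2).1
           else st.1, (lmbSolve f b (k+1) j (lmbSolve f b i k st.2).2).2) := rfl
    rw [hred]
    have hres := ihn (k+1) (by omega)
      (if st.1 < (lmbSolve f b i k st.2).1 + (lmbSolve f b (k+1) j (lmbSolve f b i k st.2).2).1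
         then (lmbSolve f b i k st.2).1 + (lmbSolve f b (k+1) j (lmbSolve f b i k st.2).2).1
         else st.1, (lmbSolve f b (k+1) j (lmbSolve f b i k st.2).2).2)
      (by omega) hy2
    refine ⟨?_, hres.2⟩
    rw [hres.1]
    conv_rhs => rw [gL, if_pos ⟨hik, hkj⟩]
    congr 1
    rw [hx1, hy1]

theorem lmbSolve_spec (b : List String) :
    ∀ (fuel : Nat) (i j : Int) (memo : PySem.Dict (Int × Int) Int),
      (j - i).toNat < fuel → lmbInv b memo →
      (lmbSolve fuel b i j memo).1 = gS b i j ∧ lmbInv b (lmbSolve fuel b i j memo).2 := by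
  intro fuel
  induction fuel with
  | zero => intro i j memo hm; omega
  | succ f IH =>
    intro i j memo hm hinv
    by_cases hji : j ≤ i
    · rw [lmbSolve, if_pos hji, gS, if_pos hji]
      exact ⟨rfl, hinv⟩
    · rw [lmbSolve, if_neg hji]
      cases hget : memo.get? (i, j) with
      | some v =>
        exact ⟨by simpa using hinv (i, j) v hget, hinv⟩
      | none =>
        simp only []
        have hp : (if bMatch (PySem.List.pyGetD b i "") (PySem.List.pyGetD b j "") then
              let q := lmbSolve f b (i+1) (j-1) memo
              ((2 + q.1, q.2) : Int × PySem.Dict (Int × Int) Int)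
            else (0, memo)).1 =
            (if bMatch (PySem.List.pyGetD b i "") (PySem.List.pyGetD b j "") then 2 + gS b (i+1) (j-1) else 0) ∧
            lmbInv b (if bMatch (PySem.List.pyGetD b i "") (PySem.List.pyGetD b j "") then
              let q := lmbSolve f b (i+1) (j-1) memo
              ((2 + q.1, q.2) : Int × PySem.Dict (Int × Int) Int)
            else (0, memo)).2 := by
          split
          · obtain ⟨h1, h2⟩ := IH (i+1) (j-1) memo (by omega) hinv
            exact ⟨by show 2 + (lmbSolve f b (i+1) (j-1) memo).1 = _; rw [h1], h2⟩
          · exact ⟨rfl, hinv⟩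
        have hloop := lmbLoopFold_spec b f i j (fun i' j' memo h hin => IH i' j' memo h hin)
          (by omega) i _ le_rfl hp.2
        rw [hp.1] at hloop
        have hval : gL b i i j
            (if bMatch (PySem.List.pyGetD b i "") (PySem.List.pyGetD b j "") then 2 + gS b (i+1) (j-1) else 0)
            = gS b i j := by
          conv_rhs => rw [gS, if_neg hji]
        refine ⟨by rw [hloop.1, hval], ?_⟩
        exact lmbInv_insert b _ i j _ hloop.2 (by rw [hloop.1, hval])

theorem gL_ge (b : List String) (i k j best : Int) : best ≤ gL b i k j best := by
  induction i, k, j, best using gL.induct b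
    (motive1 := fun _ _ => True) with
  | case1 i j hji => trivial
  | case2 i j hji ih1 ih2 => trivial
  | case3 i k j best hk ih1 ih2 ih3 =>
    rw [gL, if_pos hk]
    refine le_trans ?_ ih3
    split <;> omega
  | case4 i k j best hk => rw [gL, if_neg hk]

theorem gS_nonneg (b : List String) (i j : Int) : 0 ≤ gS b i j := by
  induction i, j using gS.induct b
    (motive2 := fun _ _ _ _ => True) with
  | case1 i j hji => rw [gS, if_pos hji]
  | case2 i j hji ih1 ih2 =>
    rw [gS, if_neg hji]
    refine le_trans ?_ (gL_ge b i i j _)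
    split <;> omega
  | case3 i k j best hk ih1 ih2 ih3 => trivial
  | case4 i k j best hk => trivial

-- ===== A-side =====
def lmbRows (b : List String) (dp : List (List Int)) : Prop :=
  dp.length = b.length ∧ ∀ r ∈ dp, r.length = b.length

def lmbCells (b : List String) (dp : List (List Int)) (F : Int → Int → Prop) : Prop :=
  ∀ i j : Int, 0 ≤ i → i < (b.length : Int) → 0 ≤ j → j < (b.length : Int) →
    (F i j → lmbGet2 dp i j = gS b i j) ∧ (¬ F i j → lmbGet2 dp i j = 0)

theorem lmbGet2_natCast (dp : List (List Int)) (n m : Nat) :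
    lmbGet2 dp n m = (dp.getD n []).getD m 0 := by
  simp [lmbGet2, PySem.List.pyGetD_natCast]

theorem lmbSet2_natCast (dp : List (List Int)) (n m : Nat) (v : Int) :
    lmbSet2 dp n m v = dp.set n ((dp.getD n []).set m v) := by
  simp [lmbSet2, PySem.List.pySetD_natCast, PySem.List.pyGetD_natCast]

theorem lmbRows_set2 (b : List String) (dp : List (List Int)) (i j : Int) (v : Int)
    (hr : lmbRows b dp) (hi : 0 ≤ i) (hi' : i < (b.length : Int)) (hj : 0 ≤ j)
    (hj' : j < (b.length : Int)) : lmbRows b (lmbSet2 dp i j v) := by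
  obtain ⟨n, rfl⟩ : ∃ n : Nat, i = (n : Int) := ⟨i.toNat, by omega⟩
  obtain ⟨m, rfl⟩ : ∃ m : Nat, j = (m : Int) := ⟨j.toNat, by omega⟩
  have hlen : dp.length = b.length := hr.1
  have hn : n < dp.length := by omega
  rw [lmbSet2_natCast]
  refine ⟨by simpa using hr.1, ?_⟩
  intro r hrm
  rcases List.mem_or_eq_of_mem_set hrm with h | h
  · exact hr.2 r h
  · subst h
    simp only [List.length_set]
    rw [List.getD_eq_getElem _ _ hn]
    exact hr.2 _ (List.getElem_mem hn)

theorem lmbGet2_set2 (b : List String) (dp : List (List Int)) (i j i' j' v : Int)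
    (hr : lmbRows b dp) (hi : 0 ≤ i) (hi' : i < (b.length : Int))
    (hj : 0 ≤ j) (hj' : j < (b.length : Int)) (hI : 0 ≤ i') (hI' : i' < (b.length : Int))
    (hJ : 0 ≤ j') (hJ' : j' < (b.length : Int)) :
    lmbGet2 (lmbSet2 dp i j v) i' j' = if i' = i ∧ j' = j then v else lmbGet2 dp i' j' := by
  obtain ⟨n, rfl⟩ : ∃ n : Nat, i = (n : Int) := ⟨i.toNat, by omega⟩
  obtain ⟨m, rfl⟩ : ∃ m : Nat, j = (m : Int) := ⟨j.toNat, by omega⟩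
  obtain ⟨n', rfl⟩ : ∃ n : Nat, i' = (n : Int) := ⟨i'.toNat, by omega⟩
  obtain ⟨m', rfl⟩ : ∃ m : Nat, j' = (m : Int) := ⟨j'.toNat, by omega⟩
  have hlen : dp.length = b.length := hr.1
  have hn : n < dp.length := by omega
  have hrowlen : (dp.getD n []).length = b.length := by
    rw [List.getD_eq_getElem _ _ hn]
    exact hr.2 _ (List.getElem_mem hn)
  rw [lmbSet2_natCast, lmbGet2_natCast, lmbGet2_natCast]
  by_cases hnn : n' = n
  · subst hnn
    have h1 : (dp.set n' ((dp.getD n' []).set m v)).getD n' [] = (dp.getD n' []).set m v := by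
      rw [List.getD_eq_getElem?_getD, List.getElem?_set_self (by omega)]
      rfl
    rw [h1]
    by_cases hmm : m' = m
    · subst hmm
      rw [if_pos ⟨rfl, rfl⟩, List.getD_eq_getElem?_getD, List.getElem?_set_self (by omega)]
      rfl
    · rw [if_neg (by simp [hmm]), List.getD_eq_getElem?_getD, List.getElem?_set_ne (by omega),
        ← List.getD_eq_getElem?_getD]
  · have h1 : (dp.set n ((dp.getD n []).set m v)).getD n' [] = dp.getD n' [] := by
      rw [List.getD_eq_getElem?_getD, List.getElem?_set_ne (by omega), ← List.getD_eq_getElem?_getD]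
    rw [h1, if_neg (by simp [hnn])]

theorem lmbCells_congr (b : List String) (dp : List (List Int)) (F F' : Int → Int → Prop)
    (hc : lmbCells b dp F)
    (h : ∀ i j : Int, 0 ≤ i → i < (b.length : Int) → 0 ≤ j → j < (b.length : Int) → (F i j ↔ F' i j)) :
    lmbCells b dp F' := by
  intro i j hi hi' hj hj'
  obtain ⟨h1, h2⟩ := hc i j hi hi' hj hj'
  rw [← h i j hi hi' hj hj']
  exact ⟨h1, h2⟩

theorem lmbRows_init (b : List String) :
    lmbRows b ((PySem.List.pyRange 0 (b.length : Int) 1).map (fun _ => List.replicate b.length (0 : Int))) := by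
  constructor
  · simp [PySem.List.length_pyRange_one]
  · intro r hr
    simp only [List.mem_map] at hr
    obtain ⟨_, _, rfl⟩ := hr
    simp

theorem lmbGet2_init (b : List String) (i j : Int) (hi : 0 ≤ i) (hi' : i < (b.length : Int)) :
    lmbGet2 ((PySem.List.pyRange 0 (b.length : Int) 1).map (fun _ => List.replicate b.length (0 : Int))) i j = 0 := by
  unfold lmbGet2
  rw [PySem.List.pyGetD_map_pyRange_of_nonneg _ _ _ _ hi hi']
  by_cases hR : PySem.Raise.InRange (List.replicate b.length (0 : Int)).length j
  · exact List.eq_of_mem_replicate (PySem.List.pyGetD_mem _ _ hR)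
  · rw [PySem.List.pyGetD_of_none _ _ _ (((PySem.List.pyGet?_eq_none_iff _ _)).mpr hR)]

-- the inner `for k in range(i, j)` fold updates only cell (i, j), accumulating gL
theorem lmbKfold (b : List String) (dp0 : List (List Int)) (F : Int → Int → Prop)
    (i j : Int) (hi : 0 ≤ i) (hij : i < j) (hj : j < (b.length : Int))
    (hF : lmbCells b dp0 F)
    (hread : ∀ k, i ≤ k → k < j → F i k ∧ F (k+1) j) :
    ∀ k, i ≤ k →
      ∀ dp cur, lmbRows b dp → lmbGet2 dp i j = cur →
      (∀ i' j' : Int, 0 ≤ i' → i' < (b.length : Int) → 0 ≤ j' → j' < (b.length : Int) →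
        ¬(i' = i ∧ j' = j) → lmbGet2 dp i' j' = lmbGet2 dp0 i' j') →
      let dp' := (PySem.List.pyRange k j 1).foldl (fun dp k =>
        lmbSet2 dp i j (max (lmbGet2 dp i k + lmbGet2 dp (k+1) j) (lmbGet2 dp i j))) dp
      lmbRows b dp' ∧ lmbGet2 dp' i j = gL b i k j cur ∧
      (∀ i' j' : Int, 0 ≤ i' → i' < (b.length : Int) → 0 ≤ j' → j' < (b.length : Int) →
        ¬(i' = i ∧ j' = j) → lmbGet2 dp' i' j' = lmbGet2 dp0 i' j') := by
  intro k
  induction hn : (j - k).toNat generalizing k with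
  | zero =>
    intro hik dp cur hr hcell hoth
    have hjk : j ≤ k := by omega
    simp only [PySem.List.pyRange_one_eq_nil hjk, List.foldl_nil]
    rw [gL, if_neg (by omega)]
    exact ⟨hr, hcell, hoth⟩
  | succ n ih =>
    intro hik dp cur hr hcell hoth
    have hkj : k < j := by omega
    simp only [PySem.List.pyRange_one_cons hkj, List.foldl_cons]
    -- reads
    have hbk : 0 ≤ k ∧ k < (b.length : Int) := ⟨by omega, by omega⟩
    have hrd := hread k hik hkj
    have hik' : lmbGet2 dp i k = gS b i k := by
      rw [hoth i k hi (by omega) hbk.1 hbk.2 (by intro h; exact absurd h.2 (by omega))]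
      exact (hF i k hi (by omega) hbk.1 hbk.2).1 hrd.1
    have hkj' : lmbGet2 dp (k+1) j = gS b (k+1) j := by
      rw [hoth (k+1) j (by omega) (by omega) (by omega) hj (by intro h; exact absurd h.1 (by omega))]
      exact (hF (k+1) j (by omega) (by omega) (by omega) hj).1 hrd.2
    rw [hik', hkj', hcell]
    set v := max (gS b i k + gS b (k+1) j) cur with hv
    have hres := ih (k+1) (by omega) (by omega)
      (lmbSet2 dp i j v) v
      (lmbRows_set2 b dp i j v hr hi (by omega) (by omega) hj)
      (by rw [lmbGet2_set2 b dp i j i j v hr hi (by omega) (by omega) hj hi (by omega) (by omega) hj,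
            if_pos ⟨rfl, rfl⟩])
      (by intro i' j' h1 h2 h3 h4 h5
          rw [lmbGet2_set2 b dp i j i' j' v hr hi (by omega) (by omega) hj h1 h2 h3 h4, if_neg h5]
          exact hoth i' j' h1 h2 h3 h4 h5)
    refine ⟨hres.1, ?_, hres.2.2⟩
    rw [hres.2.1]
    conv_rhs => rw [gL, if_pos ⟨hik, hkj⟩]
    congr 1
    rw [hv]
    split <;> omega

-- processing one cell (i, i+l) of the diagonal l turns it from 0 into gS b i (i+l)
theorem lmbCellStep (b : List String) (l i : Int) (hl : 1 ≤ l) (hi : 0 ≤ i)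
    (hiN : i + l < (b.length : Int)) (dp : List (List Int)) (hr : lmbRows b dp)
    (hc : lmbCells b dp (fun i' j' => j' - i' ≤ l - 1 ∨ (j' - i' = l ∧ i' < i))) :
    let j := i + l
    let dm := if lmbPyMatch (PySem.List.pyGetD b i "") (PySem.List.pyGetD b j "") then
        lmbSet2 dp i j (max (lmbGet2 dp i j) (2 + lmbGet2 dp (i+1) (j-1)))
      else dp
    let dp' := (PySem.List.pyRange i j 1).foldl (fun dp k =>
        lmbSet2 dp i j (max (lmbGet2 dp i k + lmbGet2 dp (k+1) j) (lmbGet2 dp i j))) dm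
    lmbRows b dp' ∧ lmbCells b dp' (fun i' j' => j' - i' ≤ l - 1 ∨ (j' - i' = l ∧ i' < i + 1)) := by
  intro j dm dp'
  have hjb : 0 ≤ j ∧ j < (b.length : Int) := ⟨by omega, by omega⟩
  have hib : i < (b.length : Int) := by omega
  have cell0 : lmbGet2 dp i j = 0 :=
    (hc i j hi hib hjb.1 hjb.2).2 (by omega)
  have hinner : lmbGet2 dp (i+1) (j-1) = gS b (i+1) (j-1) :=
    (hc (i+1) (j-1) (by omega) (by omega) (by omega) (by omega)).1 (by omega)
  have hmrows : lmbRows b dm := by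
    unfold dm; split
    · exact lmbRows_set2 b dp i j _ hr hi hib hjb.1 hjb.2
    · exact hr
  have hmoth : ∀ i' j' : Int, 0 ≤ i' → i' < (b.length : Int) → 0 ≤ j' → j' < (b.length : Int) →
      ¬(i' = i ∧ j' = j) → lmbGet2 dm i' j' = lmbGet2 dp i' j' := by
    intro i' j' h1 h2 h3 h4 h5
    unfold dm; split
    · rw [lmbGet2_set2 b dp i j i' j' _ hr hi hib hjb.1 hjb.2 h1 h2 h3 h4, if_neg h5]
    · rfl
  have hmcell : lmbGet2 dm i j =
      (if bMatch (PySem.List.pyGetD b i "") (PySem.List.pyGetD b j "") then 2 + gS b (i+1) (j-1) else 0) := by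
    unfold dm
    rw [lmbPyMatch_eq_bMatch]
    split
    · rw [lmbGet2_set2 b dp i j i j _ hr hi hib hjb.1 hjb.2 hi hib hjb.1 hjb.2, if_pos ⟨rfl, rfl⟩,
        cell0, hinner, max_eq_right (by have := gS_nonneg b (i+1) (j-1); omega)]
    · exact cell0
  have hread : ∀ k, i ≤ k → k < j → (k - i ≤ l - 1 ∨ (k - i = l ∧ i < i)) ∧
      (j - (k+1) ≤ l - 1 ∨ (j - (k+1) = l ∧ k + 1 < i)) := by
    intro k h1 h2
    exact ⟨Or.inl (by omega), Or.inl (by omega)⟩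
  have hk := lmbKfold b dp (fun i' j' => j' - i' ≤ l - 1 ∨ (j' - i' = l ∧ i' < i)) i j hi (by omega)
    hjb.2 hc hread i le_rfl dm _ hmrows hmcell hmoth
  have hfin : lmbGet2 dp' i j = gS b i j := by
    rw [hk.2.1]
    conv_rhs => rw [gS, if_neg (by omega : ¬ j ≤ i)]
  refine ⟨hk.1, ?_⟩
  intro i' j' h1 h2 h3 h4
  by_cases hij' : i' = i ∧ j' = j
  · obtain ⟨rfl, rfl⟩ := hij'
    exact ⟨fun _ => hfin, fun hn => absurd (Or.inr ⟨by omega, by omega⟩) hn⟩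
  · rw [show lmbGet2 dp' i' j' = lmbGet2 dp i' j' from hk.2.2 i' j' h1 h2 h3 h4 hij']
    obtain ⟨hF, hnF⟩ := hc i' j' h1 h2 h3 h4
    constructor
    · intro h
      refine hF ?_
      rcases h with h | ⟨h, h'⟩
      · exact Or.inl h
      · refine Or.inr ⟨h, ?_⟩
        rcases lt_or_eq_of_le (by omega : i' ≤ i) with h'' | h''
        · exact h''
        · exact absurd ⟨h'', by omega⟩ hij'
    · intro h
      refine hnF ?_
      intro hcon
      rcases hcon with hcon | ⟨hcon, hcon'⟩
      · exact h (Or.inl hcon)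
      · exact h (Or.inr ⟨hcon, by omega⟩)

-- the `for i in range(N - l)` fold fills the whole diagonal l
theorem lmbIfold (b : List String) (l : Int) (hl : 1 ≤ l) :
    ∀ t, 0 ≤ t → ∀ dp, lmbRows b dp →
      lmbCells b dp (fun i' j' => j' - i' ≤ l - 1 ∨ (j' - i' = l ∧ i' < t)) →
      let dp' := (PySem.List.pyRange t ((b.length : Int) - l) 1).foldl (fun dp i =>
        let j := i + l
        let dp := if lmbPyMatch (PySem.List.pyGetD b i "") (PySem.List.pyGetD b j "") then
            lmbSet2 dp i j (max (lmbGet2 dp i j) (2 + lmbGet2 dp (i+1) (j-1)))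
          else dp
        (PySem.List.pyRange i j 1).foldl (fun dp k =>
          lmbSet2 dp i j (max (lmbGet2 dp i k + lmbGet2 dp (k+1) j) (lmbGet2 dp i j))) dp) dp
      lmbRows b dp' ∧ lmbCells b dp' (fun i' j' => j' - i' ≤ l) := by
  intro t
  induction hn : ((b.length : Int) - l - t).toNat generalizing t with
  | zero =>
    intro ht dp hr hc dp'
    have : (b.length : Int) - l ≤ t := by omega
    unfold dp'
    rw [PySem.List.pyRange_one_eq_nil this, List.foldl_nil]
    refine ⟨hr, lmbCells_congr b dp _ _ hc ?_⟩
    intro i j hi hi' hj hj'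
    constructor
    · intro h; rcases h with h | ⟨h, _⟩ <;> omega
    · intro h
      rcases lt_or_eq_of_le (by omega : j - i ≤ l) with h' | h'
      · exact Or.inl (by omega)
      · exact Or.inr ⟨h', by omega⟩
  | succ n ih =>
    intro ht dp hr hc dp'
    have htlt : t < (b.length : Int) - l := by omega
    unfold dp'
    rw [PySem.List.pyRange_one_cons htlt, List.foldl_cons]
    have hstep := lmbCellStep b l t hl ht (by omega) dp hr hc
    exact ih (t+1) (by omega) (by omega) _ hstep.1 hstep.2

-- the outer `for l in range(1, N)` fold
theorem lmbOfold (b : List String) :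
    ∀ a, 1 ≤ a → a ≤ (b.length : Int) → ∀ dp, lmbRows b dp →
      lmbCells b dp (fun i' j' => j' - i' ≤ a - 1) →
      let dp' := (PySem.List.pyRange a (b.length : Int) 1).foldl (fun dp l =>
        (PySem.List.pyRange 0 ((b.length : Int) - l) 1).foldl (fun dp i =>
          let j := i + l
          let dp := if lmbPyMatch (PySem.List.pyGetD b i "") (PySem.List.pyGetD b j "") then
              lmbSet2 dp i j (max (lmbGet2 dp i j) (2 + lmbGet2 dp (i+1) (j-1)))
            else dp
          (PySem.List.pyRange i j 1).foldl (fun dp k =>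
            lmbSet2 dp i j (max (lmbGet2 dp i k + lmbGet2 dp (k+1) j) (lmbGet2 dp i j))) dp) dp) dp
      lmbRows b dp' ∧ lmbCells b dp' (fun i' j' => j' - i' ≤ (b.length : Int) - 1) := by
  intro a
  induction hn : ((b.length : Int) - a).toNat generalizing a with
  | zero =>
    intro h1 h2 dp hr hc dp'
    have ha : a = (b.length : Int) := by omega
    unfold dp'
    rw [PySem.List.pyRange_one_eq_nil (by omega), List.foldl_nil]
    exact ⟨hr, by rw [← ha]; exact hc⟩
  | succ n ih =>
    intro h1 h2 dp hr hc dp'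
    have halt : a < (b.length : Int) := by omega
    unfold dp'
    rw [PySem.List.pyRange_one_cons halt, List.foldl_cons]
    have hc0 : lmbCells b dp (fun i' j' => j' - i' ≤ a - 1 ∨ (j' - i' = a ∧ i' < 0)) := by
      refine lmbCells_congr b dp _ _ hc ?_
      intro i j hi hi' hj hj'
      constructor
      · exact fun h => Or.inl h
      · intro h; rcases h with h | ⟨_, h⟩
        · exact h
        · omega
    have hstep := lmbIfold b a h1 0 le_rfl dp hr hc0
    have := ih (a+1) (by omega) (by omega) (by omega) _ hstep.1
      (lmbCells_congr b _ _ _ hstep.2 (by intro i j _ _ _ _; constructor <;> (intro h; omega)))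
    exact this

theorem lmbLast_eq (b : List String) (hN : 1 ≤ (b.length : Int)) (dpf : List (List Int))
    (hrows : lmbRows b dpf) :
    PySem.List.pyGetD (PySem.List.pyGetD dpf 0 []) (-1) 0 = lmbGet2 dpf 0 ((b.length : Int) - 1) := by
  have hlen : dpf.length = b.length := hrows.1
  have hrl : (PySem.List.pyGetD dpf 0 []).length = b.length := by
    rw [PySem.List.pyGetD_zero, List.getD_eq_getElem _ _ (by omega)]
    exact hrows.2 _ (List.getElem_mem (by omega))
  have hne : (PySem.List.pyGetD dpf 0 []) ≠ [] := by
    intro h; rw [h] at hrl; simp at hrl; omega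
  unfold lmbGet2
  rw [PySem.List.pyGetD_neg_one _ _ hne]
  obtain ⟨m, hm, hm'⟩ : ∃ m : Nat, ((b.length : Int) - 1) = (m : Int) ∧ m = b.length - 1 :=
    ⟨b.length - 1, by omega, rfl⟩
  rw [hm, PySem.List.pyGetD_natCast, List.getD_eq_getElem _ _ (by omega), List.getLast_eq_getElem]
  congr 1
  omega

theorem lmbAlt_eq_gS (b : List String) :
    longest_matching_brackets_alt b = gS b 0 ((b.length : Int) - 1) := by
  have hinv : lmbInv b PySem.Dict.empty := by
    intro p v hv
    rw [PySem.Dict.get?_empty] at hv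
    cases hv
  exact (lmbSolve_spec b (b.length + 1) 0 ((b.length : Int) - 1) PySem.Dict.empty (by omega) hinv).1

theorem lmbA_eq_gS (b : List String) (hb : b ≠ []) :
    longest_matching_brackets b = gS b 0 ((b.length : Int) - 1) := by
  have hN : 1 ≤ (b.length : Int) := by
    have : b.length ≠ 0 := fun h => hb (List.eq_nil_of_length_eq_zero h)
    omega
  have hinit := lmbRows_init b
  have hc0 : lmbCells b ((PySem.List.pyRange 0 (b.length : Int) 1).map (fun _ => List.replicate b.length (0 : Int)))
      (fun i' j' => j' - i' ≤ (1 : Int) - 1) := by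
    intro i j hi hi' hj hj'
    rw [lmbGet2_init b i j hi hi']
    refine ⟨?_, fun _ => rfl⟩
    intro h
    rw [gS, if_pos (by omega)]
  have hres := lmbOfold b 1 le_rfl hN _ hinit hc0
  obtain ⟨hrows, hcells⟩ := hres
  refine Eq.trans ?_ ((hcells 0 ((b.length : Int) - 1) le_rfl (by omega) (by omega) (by omega)).1 (by omega))
  exact lmbLast_eq b hN _ hrows

-- ===== VERDICT (by name: the statement is the Claim_ definition above) =====
theorem longest_matching_brackets_spec : Claim_equal_longest_matching_brackets := by
  intro brackets _ hpre
  show longest_matching_brackets brackets = longest_matching_brackets_alt brackets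
  rw [lmbA_eq_gS brackets hpre, lmbAlt_eq_gS]
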